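-- pv_equiv track=rewrite | github.com/lonejavid/Translation_Services | server/services/edge_tts_synth.py | _best_speech_window
-- ===== SOURCE A (Python) =====
-- def _best_speech_window(
--     voiced_flags: list,
--     samples_per_frame: int,
--     target_samples: int,
--     total_samples: int,
-- ) -> tuple[int, int]:
--     """
--     Slide a window and return (start_sample, end_sample) for the segment
--     with the highest density of voiced frames.  Better than just taking the
--     first speech run — avoids intro music or room-noise segments.
--     """
--     n = len(voiced_flags)
--     win = max(1, target_samples // samples_per_frame)
--     if n <= win:
--         return 0, total_samples
--
--     best_i = 0
--     best_c = sum(voiced_flags[:win])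
--     running = best_c
--     for i in range(1, n - win + 1):
--         running -= int(voiced_flags[i - 1])
--         running += int(voiced_flags[i + win - 1])
--         if running > best_c:
--             best_c = running
--             best_i = i
--
--     s0 = best_i * samples_per_frame
--     s1 = min(total_samples, s0 + target_samples)
--     return s0, s1
-- ===== SOURCE B (Python) =====
-- def _best_speech_window(
--     voiced_flags: list,
--     samples_per_frame: int,
--     target_samples: int,
--     total_samples: int,
-- ) -> tuple[int, int]:
--     """Materialize all window counts from a prefix table, then pick the first
--     maximum with max()+list.index() instead of a running accumulator loop."""
--     n = len(voiced_flags)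
--     win = max(1, target_samples // samples_per_frame)
--     if n <= win:
--         return 0, total_samples
--
--     pre = [0]
--     for f in voiced_flags:
--         pre.append(pre[-1] + int(f))
--
--     counts = [pre[i + win] - pre[i] for i in range(n - win + 1)]
--     best_i = counts.index(max(counts))
--
--     s0 = best_i * samples_per_frame
--     s1 = min(total_samples, s0 + target_samples)
--     return s0, s1
-- ===== Notes on version B (the rewrite author's own statement) =====
-- stated objective: alternative
-- what changed: Replaces the single running-accumulator scan that tracks the best window with staged passes: a prefix-count table, a materialized list of all window counts, and first-maximum selection via max()+list.index().
import Mathlib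
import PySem

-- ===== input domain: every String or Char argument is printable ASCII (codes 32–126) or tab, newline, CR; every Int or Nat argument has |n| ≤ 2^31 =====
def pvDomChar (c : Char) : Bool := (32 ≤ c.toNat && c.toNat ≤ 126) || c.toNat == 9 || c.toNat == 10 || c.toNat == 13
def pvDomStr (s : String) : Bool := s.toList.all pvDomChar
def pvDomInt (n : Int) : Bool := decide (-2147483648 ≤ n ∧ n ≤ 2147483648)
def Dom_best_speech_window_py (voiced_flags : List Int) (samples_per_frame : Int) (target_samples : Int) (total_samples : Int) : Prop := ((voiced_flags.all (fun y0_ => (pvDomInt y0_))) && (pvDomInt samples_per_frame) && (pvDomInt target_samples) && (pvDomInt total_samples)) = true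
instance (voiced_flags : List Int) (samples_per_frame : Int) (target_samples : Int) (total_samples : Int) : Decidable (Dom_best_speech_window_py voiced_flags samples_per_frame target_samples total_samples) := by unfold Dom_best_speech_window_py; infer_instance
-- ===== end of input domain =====

-- B replaces A's running-accumulator scan by staged passes: a prefix table, a materialized
-- list of all window counts, and first-maximum selection via max + index (objective: alternative).

-- ===== PORT A =====
-- loop body of A's for-loop; indices i-1 and i+win-1 are always in range in the port's
-- calls (1 ≤ i ≤ n-win), so pyGetD is exact there
def pvAStep (voiced_flags : List Int) (win : Int) (st : Int × Int × Int) (i : Int) : Int × Int × Int :=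
  let running := st.2.2 - PySem.List.pyGetD voiced_flags (i - 1) 0
      + PySem.List.pyGetD voiced_flags (i + win - 1) 0
  if running > st.2.1 then (i, running, running) else (st.1, st.2.1, running)

def best_speech_window_py (voiced_flags : List Int) (samples_per_frame : Int) (target_samples : Int) (total_samples : Int) : Int × Int :=
  let n : Int := PySem.List.len voiced_flags
  let win : Int := max 1 (PySem.Int.floordiv target_samples samples_per_frame)
  if n ≤ win then (0, total_samples)
  else
    let init : Int := (PySem.List.slice voiced_flags none (some win)).sum
    let st := (PySem.List.pyRange 1 (n - win + 1) 1).foldl (pvAStep voiced_flags win) (0, init, init)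
    let s0 := st.1 * samples_per_frame
    (s0, min total_samples (s0 + target_samples))

-- ===== PORT B =====
def best_speech_window_py_alt (voiced_flags : List Int) (samples_per_frame : Int) (target_samples : Int) (total_samples : Int) : Int × Int :=
  let n : Int := PySem.List.len voiced_flags
  let win : Int := max 1 (PySem.Int.floordiv target_samples samples_per_frame)
  if n ≤ win then (0, total_samples)
  else
    let pre : List Int := voiced_flags.foldl (fun p f => p ++ [PySem.List.pyGetD p (-1) 0 + f]) [0]
    -- list comprehension over range(n - win + 1); both indices are in range of pre, so pyGetD is exact
    let counts : List Int := (PySem.List.pyRange 0 (n - win + 1) 1).map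
      (fun i => PySem.List.pyGetD pre (i + win) 0 - PySem.List.pyGetD pre i 0)
    -- max(counts) / counts.index(..): counts is nonempty and the value is present, so getD is exact
    let mx : Int := (PySem.List.max? counts (fun y => y)).getD 0
    let best_i : Int := ((PySem.List.index? counts mx).getD 0 : Nat)
    let s0 := best_i * samples_per_frame
    (s0, min total_samples (s0 + target_samples))

-- ===== PRECONDITION & SPEC =====
-- A raises ZeroDivisionError when samples_per_frame = 0; excluded here (B raises there too).
def Pre_best_speech_window_py (voiced_flags : List Int) (samples_per_frame : Int) (target_samples : Int) (total_samples : Int) : Prop := samples_per_frame ≠ 0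
instance (voiced_flags : List Int) (samples_per_frame : Int) (target_samples : Int) (total_samples : Int) : Decidable (Pre_best_speech_window_py voiced_flags samples_per_frame target_samples total_samples) := by unfold Pre_best_speech_window_py; infer_instance
def pvWitness_best_speech_window_py : List Int × Int × Int × Int := ([1, 0, 1], 2, 2, 6)

def Spec_best_speech_window_py (voiced_flags : List Int) (samples_per_frame : Int) (target_samples : Int) (total_samples : Int) (out : Int × Int) : Prop := out = best_speech_window_py_alt voiced_flags samples_per_frame target_samples total_samples
instance (voiced_flags : List Int) (samples_per_frame : Int) (target_samples : Int) (total_samples : Int) (out : Int × Int) : Decidable (Spec_best_speech_window_py voiced_flags samples_per_frame target_samples total_samples out) := by unfold Spec_best_speech_window_py; infer_instance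

-- ===== CLAIM (what is proved, stated in full; the proofs are below) =====
def Claim_equal_best_speech_window_py : Prop := ∀ (voiced_flags : List Int) (samples_per_frame : Int) (target_samples : Int) (total_samples : Int), Dom_best_speech_window_py voiced_flags samples_per_frame target_samples total_samples → Pre_best_speech_window_py voiced_flags samples_per_frame target_samples total_samples → Spec_best_speech_window_py voiced_flags samples_per_frame target_samples total_samples (best_speech_window_py voiced_flags samples_per_frame target_samples total_samples)

-- ===== LEMMAS AND PROOFS =====

-- prefix sum of the first k flags
def pvT (l : List Int) (k : Nat) : Int := (l.take k).sum

-- window sum of length winN starting at frame t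
def pvW (l : List Int) (winN t : Nat) : Int := pvT l (t + winN) - pvT l t

-- abstract first-argmax step over window counts c
def pvStep (c : Nat → Int) (st : Int × Int) (i : Int) : Int × Int :=
  if c i.toNat > st.2 then (i, c i.toNat) else st

lemma pvT_succ (l : List Int) (k : Nat) : pvT l (k+1) = pvT l k + l.getD k 0 := by
  simp [pvT, List.take_add_one, List.getD]
  cases h : l[k]? <;> simp

-- B's foldl builds exactly the scanl of partial sums
lemma pvPre_build_aux (l : List Int) : ∀ (p : List Int) (a : Int),
    l.foldl (fun p f => p ++ [PySem.List.pyGetD p (-1) 0 + f]) (p ++ [a])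
      = p ++ List.scanl (· + ·) a l := by
  induction l with
  | nil => intro p a; simp
  | cons x xs ih =>
      intro p a
      simp only [List.foldl_cons, PySem.List.pyGetD_neg_one_append_singleton, List.scanl_cons]
      have := ih (p ++ [a]) (a + x)
      simpa using this

lemma pvPre_build (l : List Int) :
    l.foldl (fun p f => p ++ [PySem.List.pyGetD p (-1) 0 + f]) [0]
      = List.scanl (· + ·) (0:Int) l := by
  simpa using pvPre_build_aux l [] 0

lemma pvScanl_getD (l : List Int) : ∀ (k : Nat) (a : Int), k ≤ l.length →
    (List.scanl (· + ·) a l).getD k 0 = a + pvT l k := by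
  induction l with
  | nil =>
      intro k a hk
      have hk0 : k = 0 := by simpa using hk
      subst hk0
      simp [pvT]
  | cons x xs ih =>
      intro k a hk
      cases k with
      | zero => simp [List.scanl_cons, pvT]
      | succ k =>
          rw [List.scanl_cons, List.getD_cons_succ, ih k (a + x) (by simpa using hk)]
          simp [pvT]
          ring

-- A's fold carries (best_i, best_c, running); the pair part is the abstract argmax fold
lemma pvLoop (flags : List Int) (winN : Nat) :
    ∀ (m t : Nat) (bi bc : Int), t + m + winN ≤ flags.length →
    (PySem.List.pyRange (↑t + 1) (↑t + 1 + ↑m) 1).foldl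
        (pvAStep flags (↑winN)) (bi, bc, pvW flags winN t)
      = (((PySem.List.pyRange (↑t + 1) (↑t + 1 + ↑m) 1).foldl
            (pvStep (pvW flags winN)) (bi, bc)).1,
         ((PySem.List.pyRange (↑t + 1) (↑t + 1 + ↑m) 1).foldl
            (pvStep (pvW flags winN)) (bi, bc)).2,
         pvW flags winN (t + m)) := by
  intro m
  induction m with
  | zero =>
      intro t bi bc h
      rw [PySem.List.pyRange_one_eq_nil (by omega)]
      simp
  | succ m ih =>
      intro t bi bc h
      rw [PySem.List.pyRange_one_cons (by push_cast; omega)]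
      simp only [List.foldl_cons]
      have g1 : PySem.List.pyGetD flags ((t:Int) + 1 - 1) 0 = flags.getD t 0 := by
        rw [show ((t:Int) + 1 - 1) = ((t:Nat):Int) from by ring, PySem.List.pyGetD_natCast]
      have g2 : PySem.List.pyGetD flags ((t:Int) + 1 + (winN:Int) - 1) 0
          = flags.getD (t + winN) 0 := by
        rw [show ((t:Int) + 1 + (winN:Int) - 1) = ((t + winN : Nat):Int) from by push_cast; ring,
            PySem.List.pyGetD_natCast]
      have hrun : pvW flags winN t - PySem.List.pyGetD flags ((t:Int) + 1 - 1) 0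
          + PySem.List.pyGetD flags ((t:Int) + 1 + (winN:Int) - 1) 0
          = pvW flags winN (t+1) := by
        rw [g1, g2]
        have e1 := pvT_succ flags t
        have e2 := pvT_succ flags (t + winN)
        simp only [pvW]
        rw [show t + 1 + winN = t + winN + 1 from by omega]
        omega
      have hra : pvAStep flags (↑winN) (bi, bc, pvW flags winN t) ((t:Int) + 1)
          = (if pvW flags winN (t+1) > bc
             then ((t:Int) + 1, pvW flags winN (t+1), pvW flags winN (t+1))
             else (bi, bc, pvW flags winN (t+1))) := by
        simp only [pvAStep]
        rw [hrun]
      have hrb : pvStep (pvW flags winN) (bi, bc) ((t:Int) + 1)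
          = (if pvW flags winN (t+1) > bc then ((t:Int) + 1, pvW flags winN (t+1))
             else (bi, bc)) := by
        simp only [pvStep]
        rw [show (((t:Int) + 1).toNat) = t + 1 from by omega]
      rw [hra, hrb]
      have eb : ((t:Int) + 1 + ((m:Int) + 1)) = ((t + 1 : Nat):Int) + 1 + (m:Int) := by
        push_cast; ring
      have ec : t + (m + 1) = t + 1 + m := by omega
      have es : ((t:Int) + 1 + 1) = ((t + 1 : Nat):Int) + 1 := by push_cast; ring
      by_cases hgt : pvW flags winN (t+1) > bc
      · rw [if_pos hgt, if_pos hgt]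
        push_cast
        rw [eb, ec, es]
        exact ih (t+1) ((t:Int) + 1) (pvW flags winN (t+1)) (by omega)
      · rw [if_neg hgt, if_neg hgt]
        push_cast
        rw [eb, ec, es]
        exact ih (t+1) bi bc (by omega)

-- the abstract fold computes the FIRST index of the maximum of the counts list
lemma pvArgmax (c : Nat → Int) :
    ∀ (m t : Nat) (bi bc : Int) (j : Nat),
    PySem.List.index? ((List.range (t+1)).map c) bc = some j → bi = (j:Int) →
    (∀ y ∈ (List.range (t+1)).map c, y ≤ bc) →
    ∃ k, PySem.List.index? ((List.range (t+1+m)).map c)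
           (((PySem.List.pyRange (↑t+1) (↑t+1+↑m) 1).foldl (pvStep c) (bi, bc)).2) = some k
      ∧ ((PySem.List.pyRange (↑t+1) (↑t+1+↑m) 1).foldl (pvStep c) (bi, bc)).1 = (k:Int)
      ∧ (∀ y ∈ (List.range (t+1+m)).map c,
           y ≤ ((PySem.List.pyRange (↑t+1) (↑t+1+↑m) 1).foldl (pvStep c) (bi, bc)).2) := by
  intro m
  induction m with
  | zero =>
      intro t bi bc j hidx hbi hub
      rw [PySem.List.pyRange_one_eq_nil (by omega)]
      exact ⟨j, by simpa using hidx, by simpa using hbi, by simpa using hub⟩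
  | succ m ih =>
      intro t bi bc j hidx hbi hub
      rw [PySem.List.pyRange_one_cons (by push_cast; omega)]
      simp only [List.foldl_cons]
      have hprefix : (List.range (t+1+1)).map c = (List.range (t+1)).map c ++ [c (t+1)] := by
        rw [List.range_succ, List.map_append]; rfl
      have hst : pvStep c (bi, bc) ((t:Int) + 1)
          = (if c (t+1) > bc then ((t:Int) + 1, c (t+1)) else (bi, bc)) := by
        simp only [pvStep]
        rw [show (((t:Int) + 1).toNat) = t + 1 from by omega]
      rw [hst]
      have eb : ((t:Int) + 1 + ((m:Int) + 1)) = ((t + 1 : Nat):Int) + 1 + (m:Int) := by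
        push_cast; ring
      have es : ((t:Int) + 1 + 1) = ((t + 1 : Nat):Int) + 1 := by push_cast; ring
      have en : t + 1 + (m + 1) = (t + 1) + 1 + m := by omega
      by_cases hgt : c (t+1) > bc
      · rw [if_pos hgt]
        push_cast
        rw [eb, es, en]
        apply ih (t+1) ((t:Int)+1) (c (t+1)) (t+1)
        · rw [hprefix]
          have hnot : c (t+1) ∉ (List.range (t+1)).map c := by
            intro hmem
            exact absurd (hub _ hmem) (by omega)
          have := PySem.List.index?_append_singleton_self ((List.range (t+1)).map c) (c (t+1)) hnot
          simpa using this
        · push_cast; ring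
        · intro y hy
          rw [hprefix] at hy
          rcases List.mem_append.mp hy with h | h
          · exact le_of_lt (lt_of_le_of_lt (hub y h) hgt)
          · simp at h; omega
      · rw [if_neg hgt]
        push_cast
        rw [eb, es, en]
        apply ih (t+1) bi bc j
        · rw [hprefix]
          have hsome : (PySem.List.index? ((List.range (t+1)).map c) bc).isSome := by
            rw [hidx]; rfl
          rw [PySem.List.index?_append_of_mem _ ((PySem.List.index?_isSome_iff _ _).mp hsome)]
          exact hidx
        · exact hbi
        · intro y hy
          rw [hprefix] at hy
          rcases List.mem_append.mp hy with h | h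
          · exact hub y h
          · simp at h; omega

-- ===== VERDICT (by name: the statement is the Claim_ definition above) =====
theorem best_speech_window_py_spec : Claim_equal_best_speech_window_py := by
  intro flags spf ts tot _ _
  unfold Spec_best_speech_window_py best_speech_window_py best_speech_window_py_alt
  simp only [PySem.List.len_eq]
  set win : Int := max 1 (PySem.Int.floordiv ts spf) with hwin
  by_cases hg : (↑flags.length : Int) ≤ win
  · simp [hg]
  · simp only [if_neg hg]
    have hw1 : 1 ≤ win := le_max_left _ _
    set winN : Nat := win.toNat with hwN
    have hcast : win = (↑winN : Int) := by omega
    have hlt : winN < flags.length := by omega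
    set m : Nat := flags.length - winN with hm
    set c : Nat → Int := pvW flags winN with hc
    -- B's prefix list is the scanl of partial sums
    rw [pvPre_build flags]
    -- B's counts list is the window-sum list
    have hcounts : (PySem.List.pyRange 0 ((↑flags.length : Int) - win + 1) 1).map
        (fun i => PySem.List.pyGetD (List.scanl (· + ·) 0 flags) (i + win) 0
                  - PySem.List.pyGetD (List.scanl (· + ·) 0 flags) i 0)
        = (List.range (m+1)).map c := by
      have hb : ((↑flags.length : Int) - win + 1) = ((m + 1 : Nat) : Int) := by
        rw [hcast]; push_cast; omega
      rw [hb, PySem.List.pyRange_zero_nat, List.map_map]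
      apply List.map_congr_left
      intro k hk
      have hk' : k ≤ m := by simpa [Nat.lt_succ_iff] using hk
      simp only [Function.comp]
      have h1 : PySem.List.pyGetD (List.scanl (· + ·) 0 flags) ((k:Int) + win) 0
          = 0 + pvT flags (k + winN) := by
        rw [hcast, show ((k:Int) + (winN:Int)) = ((k + winN : Nat):Int) from by push_cast; ring,
            PySem.List.pyGetD_natCast]
        exact pvScanl_getD flags (k + winN) 0 (by omega)
      have h2 : PySem.List.pyGetD (List.scanl (· + ·) 0 flags) (k:Int) 0
          = 0 + pvT flags k := by
        rw [PySem.List.pyGetD_natCast]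
        exact pvScanl_getD flags k 0 (by omega)
      rw [h1, h2]
      simp [hc, pvW]
    rw [hcounts]
    -- A's initial window count
    have hinit : (PySem.List.slice flags none (some win)).sum = c 0 := by
      rw [PySem.List.slice_to flags (show (0:Int) ≤ win from by omega)]
      simp [hc, pvW, pvT]
      rw [hwN]
    rw [hinit]
    -- the abstract fold is the first argmax of the counts list
    have hidx0 : PySem.List.index? ((List.range (0+1)).map c) (c 0) = some 0 := by
      rw [show ((List.range (0+1)).map c) = [c 0] from by simp [List.range_succ]]
      exact PySem.List.index?_cons_self _ _
    obtain ⟨k, hik, hk1, hkub⟩ := pvArgmax c m 0 0 (c 0) 0 hidx0 (by norm_num)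
      (by intro y hy; simp [List.range_succ] at hy; omega)
    -- A's fold, reduced to the abstract argmax fold
    have L := pvLoop flags winN m 0 0 (c 0) (by omega)
    simp only [← hc] at L
    norm_num at L
    simp only [Nat.cast_zero, zero_add] at hik hk1 hkub
    rw [show 1 + m = m + 1 from Nat.add_comm 1 m] at hik hkub
    have hb : ((↑flags.length : Int) - win + 1) = 1 + (m:Int) := by
      rw [hcast]; push_cast; omega
    rw [hb, hcast, L]
    -- B's max(counts) is the fold's best count
    set r := (PySem.List.pyRange 1 (1+(m:Int)) 1).foldl (pvStep c) (0, c 0) with hr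
    have hne : ((List.range (m+1)).map c) ≠ [] := by simp
    obtain ⟨M, hM⟩ : ∃ M, PySem.List.max? ((List.range (m+1)).map c) (fun y => y) = some M := by
      cases hmx : PySem.List.max? ((List.range (m+1)).map c) (fun y => y) with
      | none => exact absurd ((PySem.List.max?_eq_none_iff _ _).mp hmx) hne
      | some v => exact ⟨v, rfl⟩
    have hr2mem : r.2 ∈ (List.range (m+1)).map c := by
      have hsome : (PySem.List.index? ((List.range (m+1)).map c) r.2).isSome := by
        rw [hik]; rfl
      exact (PySem.List.index?_isSome_iff _ _).mp hsome
    have hMr : M = r.2 := by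
      have h1 := PySem.List.max?_isMax hM r.2 hr2mem
      have h2 := hkub M (PySem.List.max?_mem hM)
      simp at h1
      omega
    rw [hM]
    simp only [Option.getD_some, hMr]
    rw [hik]
    simp only [Option.getD_some, hk1]
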